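-- pv_equiv track=rewrite | github.com/JFerrerBeired/analysis_slambench | slamread.py | frames_to_interval_string
-- ===== SOURCE A (Python) =====
-- def frames_to_interval_string(frames):
--     """ Given a secuence of frames, produces a string with interval format. """
--     def interval_to_string(ini, end):
--         if ini == end:
--             return "%d, " % ini
--         else:
--             return "%d-%d, " % (ini, end)
--
--     str = ""
--     if len(frames):
--         ini = frames[0] #Set to first frame
--         last_frame = frames[0]
--         end = frames[0]
--
--         if len(frames) == 1:
--             str += interval_to_string(ini, end)
--         else:
--             for frame in frames[1:]:
--                 if frame == last_frame + 1: #Extend interval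
--                     end = frame
--                 else: #End interval
--                     str += interval_to_string(ini, end)
--                     ini = frame
--                     end = frame
--
--                 last_frame = frame
--
--             str += interval_to_string(ini, end)
--
--     return str[:-2]
-- ===== SOURCE B (Python) =====
-- def frames_to_interval_string(frames):
--     """ Given a secuence of frames, produces a string with interval format. """
--     if not frames:
--         return ""
--     n = len(frames)
--     bounds = [0] + [i for i in range(1, n) if frames[i] != frames[i - 1] + 1] + [n]
--     tokens = ["%d" % frames[a] if b == a + 1 else "%d-%d" % (frames[a], frames[b - 1])
--               for a, b in zip(bounds, bounds[1:])]
--     return ", ".join(tokens)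
-- ===== Notes on version B (the rewrite author's own statement) =====
-- stated objective: alternative
-- what changed: B replaces A's stateful run-accumulator loop (growing a 'tok, ' string and slicing off the trailing two characters) by staged passes: first a comprehension computes the boundary indices where consecutivity breaks, then tokens are formatted from adjacent pairs of bounds via zip, and ', '.join finishes.
import Mathlib
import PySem

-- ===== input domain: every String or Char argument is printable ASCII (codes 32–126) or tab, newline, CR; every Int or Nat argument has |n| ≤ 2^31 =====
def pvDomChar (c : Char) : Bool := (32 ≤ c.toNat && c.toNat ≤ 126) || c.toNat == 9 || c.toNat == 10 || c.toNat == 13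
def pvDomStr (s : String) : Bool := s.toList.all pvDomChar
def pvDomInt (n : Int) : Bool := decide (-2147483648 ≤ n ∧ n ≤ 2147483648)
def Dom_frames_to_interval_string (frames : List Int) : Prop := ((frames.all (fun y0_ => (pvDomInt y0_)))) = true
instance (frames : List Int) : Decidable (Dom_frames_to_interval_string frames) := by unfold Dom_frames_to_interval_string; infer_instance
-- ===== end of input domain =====

-- B replaces A's stateful run-accumulator loop (which grows a "tok, " string and slices off the
-- trailing two characters) by staged passes: a comprehension collecting the boundary indices where
-- consecutivity breaks, token formatting from adjacent pairs of bounds via zip, and ", ".join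
-- (objective: alternative).

-- ===== PORT A =====
-- interval_to_string(ini, end)
def pvIts (ini endv : Int) : String :=
  if ini == endv then PySem.Int.toStr ini ++ ", "
  else PySem.Int.toStr ini ++ "-" ++ PySem.Int.toStr endv ++ ", "

-- the 'for frame in frames[1:]' loop, state (str, ini, end, last_frame)
def pvLoopA (fs : List Int) (s : String) (ini endv last : Int) : String × Int × Int × Int :=
  match fs with
  | [] => (s, ini, endv, last)
  | f :: rest =>
    if f == last + 1 then pvLoopA rest s ini f f
    else pvLoopA rest (s ++ pvIts ini endv) f f f

def frames_to_interval_string (frames : List Int) : String :=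
  match frames with
  | [] => PySem.Str.slice "" none (some (-2))          -- len(frames) == 0: str stays ""
  | x :: rest =>
    let s :=
      if rest.length == 0 then pvIts x x               -- len(frames) == 1 branch
      else
        let r := pvLoopA rest "" x x x
        r.1 ++ pvIts r.2.1 r.2.2.1                     -- final 'str += interval_to_string(ini, end)'
    PySem.Str.slice s none (some (-2))                 -- return str[:-2]

-- ===== PORT B =====
-- all frame indexing below (frames[i], frames[i-1], frames[a], frames[b-1]) is at indices that are
-- in range by construction (bounds lie in [0, n]), so getD is exact for Python's frames[...]
def frames_to_interval_string_alt (frames : List Int) : String :=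
  if frames.isEmpty then ""                            -- 'if not frames: return ""'
  else
    let n : Int := frames.length
    let bounds : List Int :=
      [0] ++ ((PySem.List.pyRange 1 n 1).filter
        (fun i => !(frames.getD i.toNat 0 == frames.getD (i - 1).toNat 0 + 1))) ++ [n]
    let tokens := (bounds.zip (PySem.List.slice bounds (some 1) none)).map
      (fun ab => if ab.2 == ab.1 + 1 then PySem.Int.toStr (frames.getD ab.1.toNat 0)
                 else PySem.Int.toStr (frames.getD ab.1.toNat 0) ++ "-" ++
                      PySem.Int.toStr (frames.getD (ab.2 - 1).toNat 0))
    PySem.Str.join ", " tokens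

-- ===== PRECONDITION & SPEC =====
def Spec_frames_to_interval_string (frames : List Int) (out : String) : Prop := out = frames_to_interval_string_alt frames
instance (frames : List Int) (out : String) : Decidable (Spec_frames_to_interval_string frames out) := by unfold Spec_frames_to_interval_string; infer_instance

-- ===== CLAIM (what is proved, stated in full; the proofs are below) =====
def Claim_equal_frames_to_interval_string : Prop := ∀ (frames : List Int), Dom_frames_to_interval_string frames → Spec_frames_to_interval_string frames (frames_to_interval_string frames)

-- ===== LEMMAS AND PROOFS =====

-- ---- shared run decomposition used to relate both ports ----
def pvRunsFrom (ini e : Int) : List Int → List (Int × Int)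
  | [] => [(ini, e)]
  | f :: rest => if f == e + 1 then pvRunsFrom ini f rest else (ini, e) :: pvRunsFrom f f rest

def pvRuns : List Int → List (Int × Int)
  | [] => []
  | x :: rest => pvRunsFrom x x rest

def pvTok (a b : Int) : String :=
  if b == a then PySem.Int.toStr a else PySem.Int.toStr a ++ "-" ++ PySem.Int.toStr b

def pvRend : List (Int × Int) → String
  | [] => ""
  | r :: rs => pvIts r.1 r.2 ++ pvRend rs

-- list-level scan of one maximal run
def pvEat (e : Int) (l : List Int) : Int × List Int :=
  match l with
  | [] => (e, [])
  | f :: rest => if f == e + 1 then pvEat f rest else (e, f :: rest)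

theorem pvEat_len (e : Int) (l : List Int) : (pvEat e l).2.length ≤ l.length := by
  induction l generalizing e with
  | nil => simp [pvEat]
  | cons f rest ih =>
    simp only [pvEat]
    split
    · exact le_trans (ih f) (by simp)
    · simp

def pvToksL (xs : List Int) : List String :=
  match xs with
  | [] => []
  | x :: rest =>
    let p := pvEat x rest
    (if p.1 == x then PySem.Int.toStr x
     else PySem.Int.toStr x ++ "-" ++ PySem.Int.toStr p.1) :: pvToksL p.2
termination_by xs.length
decreasing_by exact Nat.lt_succ_of_le (pvEat_len x rest)

-- ---- index-level scan (mirrors the run structure on positions) ----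
def pvScan (frames : List Int) (j : Nat) : Nat :=
  if _ : j < frames.length then
    if frames.getD j 0 == frames.getD (j - 1) 0 + 1 then pvScan frames (j + 1) else j
  else j
termination_by frames.length - j

theorem pvScan_ge (frames : List Int) (j : Nat) : j ≤ pvScan frames j := by
  fun_induction pvScan frames j with
  | case1 _ _ _ ih => omega
  | case2 => omega
  | case3 => omega

def pvTokA (frames : List Int) (a b : Nat) : String :=
  if b == a + 1 then PySem.Int.toStr (frames.getD a 0)
  else PySem.Int.toStr (frames.getD a 0) ++ "-" ++ PySem.Int.toStr (frames.getD (b - 1) 0)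

def pvToksIdx (frames : List Int) (i : Nat) : List String :=
  if _ : i < frames.length then
    pvTokA frames i (pvScan frames (i + 1)) :: pvToksIdx frames (pvScan frames (i + 1))
  else []
termination_by frames.length - i
decreasing_by have := pvScan_ge frames (i + 1); omega

-- the index scan agrees with the list-level scan on the corresponding suffix
theorem pvScan_eat (frames : List Int) (j : Nat) :
    (pvEat (frames.getD (j - 1) 0) (frames.drop j)).1 = frames.getD (pvScan frames j - 1) 0
    ∧ (pvEat (frames.getD (j - 1) 0) (frames.drop j)).2 = frames.drop (pvScan frames j)
    ∧ frames.getD (pvScan frames j - 1) 0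
        = frames.getD (j - 1) 0 + ((pvScan frames j - j : Nat) : Int) := by
  fun_induction pvScan frames j with
  | case1 j hj hc ih =>
    have hdrop : frames.drop j = frames.getD j 0 :: frames.drop (j + 1) := by
      rw [List.drop_eq_getElem_cons hj]
      congr 1
      rw [List.getD_eq_getElem?_getD, List.getElem?_eq_getElem hj]
      rfl
    have hge := pvScan_ge frames (j + 1)
    rw [hdrop]
    simp only [pvEat]
    rw [if_pos hc]
    simp only [Nat.add_sub_cancel] at ih
    refine ⟨ih.1, ih.2.1, ?_⟩
    have h3 := ih.2.2
    have hc' : frames.getD j 0 = frames.getD (j - 1) 0 + 1 := by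
      simpa using hc
    rw [h3, hc']
    push_cast [Nat.cast_sub (by omega : j + 1 ≤ pvScan frames (j + 1)),
      Nat.cast_sub (by omega : j ≤ pvScan frames (j + 1))]
    ring
  | case2 j hj hc =>
    have hdrop : frames.drop j = frames.getD j 0 :: frames.drop (j + 1) := by
      rw [List.drop_eq_getElem_cons hj]
      congr 1
      rw [List.getD_eq_getElem?_getD, List.getElem?_eq_getElem hj]
      rfl
    rw [hdrop]
    simp only [pvEat]
    rw [if_neg hc]
    exact ⟨rfl, rfl, by simp⟩
  | case3 j hj =>
    have : frames.drop j = [] := List.drop_of_length_le (by omega)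
    simp [this, pvEat]

theorem pvToksIdx_eq (frames : List Int) (i : Nat) :
    pvToksIdx frames i = pvToksL (frames.drop i) := by
  fun_induction pvToksIdx frames i with
  | case1 i hi ih =>
    have hdrop : frames.drop i = frames.getD i 0 :: frames.drop (i + 1) := by
      rw [List.drop_eq_getElem_cons hi]
      congr 1
      rw [List.getD_eq_getElem?_getD, List.getElem?_eq_getElem hi]
      rfl
    have hse := pvScan_eat frames (i + 1)
    simp only [Nat.add_sub_cancel] at hse
    have hge := pvScan_ge frames (i + 1)
    rw [hdrop]
    simp only [pvToksL]
    rw [← hse.2.1] at ih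
    refine congrArg₂ _ ?_ ih
    rw [hse.1]
    simp only [pvTokA]
    by_cases hj : pvScan frames (i + 1) = i + 1
    · simp [hj]
    · have hne : frames.getD (pvScan frames (i + 1) - 1) 0 ≠ frames.getD i 0 := by
        rw [hse.2.2]
        have : (1 : Int) ≤ ((pvScan frames (i + 1) - (i + 1) : Nat) : Int) := by
          have : 1 ≤ pvScan frames (i + 1) - (i + 1) := by omega
          exact_mod_cast this
        omega
      have hjb : ¬(pvScan frames (i + 1) == i + 1) = true := by simpa using hj
      have hneb : ¬(frames.getD (pvScan frames (i + 1) - 1) 0 == frames.getD i 0) = true := by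
        simpa using hne
      rw [if_neg hjb, if_neg hneb]
  | case2 i hi =>
    have : frames.drop i = [] := List.drop_of_length_le (by omega)
    simp [this, pvToksL]

theorem pvEat_runs (l : List Int) : ∀ (ini e : Int),
    pvRunsFrom ini e l = (ini, (pvEat e l).1) :: pvRuns (pvEat e l).2 := by
  induction l with
  | nil => intro ini e; simp [pvRunsFrom, pvEat, pvRuns]
  | cons f rest ih =>
    intro ini e
    simp only [pvRunsFrom, pvEat]
    split
    · exact ih ini f
    · simp [pvRuns]

theorem pvToksL_runs (xs : List Int) :
    pvToksL xs = (pvRuns xs).map (fun r => pvTok r.1 r.2) := by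
  fun_induction pvToksL xs with
  | case1 => simp [pvRuns]
  | case2 x rest p ih =>
    simp only [pvRuns, pvEat_runs rest x x, List.map_cons]
    refine congrArg₂ _ ?_ ?_
    · simp [pvTok, p]
    · rw [ih]; rfl

theorem pvLoopA_rend (l : List Int) : ∀ (s : String) (ini e : Int),
    (pvLoopA l s ini e e).1 ++ pvIts (pvLoopA l s ini e e).2.1 (pvLoopA l s ini e e).2.2.1
      = s ++ pvRend (pvRunsFrom ini e l) := by
  induction l with
  | nil => intro s ini e; simp [pvLoopA, pvRunsFrom, pvRend, String.append_empty]
  | cons f rest ih =>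
    intro s ini e
    simp only [pvLoopA, pvRunsFrom]
    split
    · exact ih s ini f
    · rw [ih (s ++ pvIts ini e) f f]
      simp [pvRend, String.append_assoc]

theorem A_rend (frames : List Int) :
    frames_to_interval_string frames = PySem.Str.slice (pvRend (pvRuns frames)) none (some (-2)) := by
  match frames with
  | [] => rfl
  | [x] => simp [frames_to_interval_string, pvRuns, pvRunsFrom, pvRend, String.append_empty]
  | x :: f :: rest =>
    simp only [frames_to_interval_string, pvRuns]
    have h := pvLoopA_rend (f :: rest) "" x x
    simp only [String.empty_append] at h
    simp [h]

theorem pvIts_toList (a b : Int) :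
    (pvIts a b).toList = (pvTok a b).toList ++ [',', ' '] := by
  by_cases h : a = b
  · simp [pvIts, pvTok, h]
  · have h' : ¬ b = a := fun hb => h hb.symm
    simp [pvIts, pvTok, h, h']

theorem pvRend_toList (rs : List (Int × Int)) :
    (pvRend rs).toList = (rs.map (fun r => (pvTok r.1 r.2).toList ++ [',', ' '])).flatten := by
  induction rs with
  | nil => simp [pvRend]
  | cons r rs ih => simp [pvRend, pvIts_toList, ih]

-- join-vs-strip: dropping the last two chars of "t1, t2, …, tn, " gives ", ".join(tokens)
theorem take_flatten_join (ts : List (List Char)) :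
    (List.flatten (ts.map (fun t => t ++ [',', ' ']))).take
        ((List.flatten (ts.map (fun t => t ++ [',', ' ']))).length - 2)
      = PySem.Chars.join [',', ' '] ts := by
  match ts with
  | [] => simp [PySem.Chars.join_nil]
  | [t] =>
    simp [PySem.Chars.join_singleton]
  | t :: t' :: rest =>
    have ih := take_flatten_join (t' :: rest)
    rw [PySem.Chars.join_cons_cons, ← ih]
    simp only [List.map_cons, List.flatten_cons, List.length_append, List.length_cons]
    set F := List.flatten ((t' :: rest).map (fun t => t ++ [',', ' '])) with hF
    have hFlen : 2 ≤ F.length := by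
      rw [hF]; simp; omega
    rw [List.take_append, List.take_append]
    rw [List.take_of_length_le (by omega), List.take_of_length_le (by simp; omega)]
    congr 2
    simp
    omega

-- A's port equals the ", "-join of the index tokens
theorem A_eq_join (frames : List Int) :
    frames_to_interval_string frames = PySem.Str.join ", " (pvToksIdx frames 0) := by
  apply String.toList_inj.mp
  rw [A_rend, pvToksIdx_eq, List.drop_zero, pvToksL_runs,
    PySem.Str.toList_join, PySem.Str.toList_slice, PySem.Chars.slice_eq_listSlice,
    PySem.List.slice_to_neg_ofNat _ 2 (by omega), pvRend_toList]
  have : (", " : String).toList = [',', ' '] := rfl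
  rw [this]
  have h2 := take_flatten_join ((pvRuns frames).map (fun r => (pvTok r.1 r.2).toList))
  simp only [List.map_map, Function.comp_def] at h2 ⊢
  exact h2

-- ---- B's bounds lists reproduce the index tokens ----
def pvIsBrk (frames : List Int) (k : Nat) : Bool :=
  !(frames.getD k 0 == frames.getD (k - 1) 0 + 1)

def pvGo (frames : List Int) : Nat → List Nat → List String
  | _, [] => []
  | a, b :: bs => pvTokA frames a b :: pvGo frames b bs

def pvPairs {α : Type} (a : α) : List α → List (α × α)
  | [] => []
  | b :: bs => (a, b) :: pvPairs b bs

theorem zip_tail_pairs {α : Type} (l : List α) : ∀ (a : α),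
    (a :: l).zip l = pvPairs a l := by
  induction l with
  | nil => intro a; rfl
  | cons b bs ih =>
    intro a
    simp only [List.zip_cons_cons, pvPairs]
    exact congrArg _ (ih b)

theorem pvScan_le (frames : List Int) (j : Nat) (h : j ≤ frames.length) :
    pvScan frames j ≤ frames.length := by
  fun_induction pvScan frames j with
  | case1 j hj hc ih => exact ih (by omega)
  | case2 j hj hc => omega
  | case3 j hj => omega

theorem pvScan_nobrk (frames : List Int) (j : Nat) :
    ∀ k, j ≤ k → k < pvScan frames j → pvIsBrk frames k = false := by
  fun_induction pvScan frames j with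
  | case1 j hj hc ih =>
    intro k hk1 hk2
    by_cases hkj : k = j
    · subst hkj; simp only [pvIsBrk, hc, Bool.not_true]
    · exact ih k (by omega) hk2
  | case2 j hj hc => intro k h1 h2; omega
  | case3 j hj => intro k h1 h2; omega

theorem pvScan_brk (frames : List Int) (j : Nat)
    (h : pvScan frames j < frames.length) : pvIsBrk frames (pvScan frames j) = true := by
  fun_induction pvScan frames j with
  | case1 j hj hc ih => exact ih h
  | case2 j hj hc =>
    have hcf : (frames.getD j 0 == frames.getD (j - 1) 0 + 1) = false := by
      simpa using hc
    simp only [pvIsBrk, hcf, Bool.not_false]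
  | case3 j hj => omega

-- the boundary list between two breaks, fed to pvGo, computes the index tokens
theorem pvGo_toks (frames : List Int) (i : Nat) (hi : i < frames.length) :
    pvGo frames i ((List.range' (i + 1) (frames.length - (i + 1))).filter (pvIsBrk frames)
        ++ [frames.length])
      = pvToksIdx frames i := by
  have hj1 : i + 1 ≤ pvScan frames (i + 1) := pvScan_ge frames (i + 1)
  have hjn : pvScan frames (i + 1) ≤ frames.length := pvScan_le frames (i + 1) (by omega)
  set j := pvScan frames (i + 1) with hjdef
  have hsplit : List.range' (i + 1) (frames.length - (i + 1))
      = List.range' (i + 1) (j - (i + 1)) ++ List.range' j (frames.length - j) := by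
    have h : List.range' (i + 1) (j - (i + 1)) ++ List.range' ((i + 1) + (j - (i + 1))) (frames.length - j)
        = List.range' (i + 1) ((j - (i + 1)) + (frames.length - j)) := List.range'_append_1
    rw [show i + 1 + (j - (i + 1)) = j by omega,
        show j - (i + 1) + (frames.length - j) = frames.length - (i + 1) by omega] at h
    exact h.symm
  have hnil : (List.range' (i + 1) (j - (i + 1))).filter (pvIsBrk frames) = [] := by
    rw [List.filter_eq_nil_iff]
    intro k hk
    rw [List.mem_range'_1] at hk
    simp [pvScan_nobrk frames (i + 1) k (by omega) (by omega)]
  rw [hsplit, List.filter_append, hnil, List.nil_append]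
  rw [pvToksIdx, dif_pos hi, ← hjdef]
  by_cases hje : j = frames.length
  · rw [hje]
    simp only [Nat.sub_self, List.range'_zero, List.filter_nil, List.nil_append]
    rw [pvGo, pvGo, pvToksIdx, dif_neg (by omega)]
  · have hjl : j < frames.length := by omega
    have hL : frames.length - j = (frames.length - (j + 1)) + 1 := by omega
    rw [hL, List.range'_succ, List.filter_cons_of_pos (by simpa [hjdef] using pvScan_brk frames (i + 1) hjl)]
    rw [List.cons_append, pvGo]
    exact congrArg _ (pvGo_toks frames j hjl)
termination_by frames.length - i
decreasing_by omega

-- casting B's Int-valued bounds down to the Nat-level pvGo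
theorem pvPairs_map_tok (frames : List Int) (l : List Nat) : ∀ (a : Nat),
    (∀ x ∈ l, 1 ≤ x) →
    (pvPairs ((a : Nat) : Int) (l.map (fun k : Nat => (k : Int)))).map
      (fun ab => if ab.2 == ab.1 + 1 then PySem.Int.toStr (frames.getD ab.1.toNat 0)
                 else PySem.Int.toStr (frames.getD ab.1.toNat 0) ++ "-" ++
                      PySem.Int.toStr (frames.getD (ab.2 - 1).toNat 0))
      = pvGo frames a l := by
  induction l with
  | nil => intro a h; rfl
  | cons b bs ih =>
    intro a h
    have hb : 1 ≤ b := h b (by simp)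
    simp only [List.map_cons, pvPairs, pvGo]
    refine congrArg₂ _ ?_ (ih b (fun x hx => h x (by simp [hx])))
    simp only [pvTokA]
    have h1 : ((b : Int) == (a : Int) + 1) = (b == a + 1) := by
      by_cases hba : b = a + 1
      · simp [hba]
      · simp [hba]
        omega
    have h2 : ((a : Int)).toNat = a := Int.toNat_natCast a
    have h3 : ((b : Int) - 1).toNat = b - 1 := by omega
    rw [h1, h2, h3]

-- B's Int break comprehension is the cast of the Nat-level one
theorem breaks_cast (frames : List Int) :
    (PySem.List.pyRange 1 (frames.length : Int) 1).filter
        (fun i => !(frames.getD i.toNat 0 == frames.getD (i - 1).toNat 0 + 1))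
      = ((List.range' 1 (frames.length - 1)).filter (pvIsBrk frames)).map
          (fun k : Nat => (k : Int)) := by
  rw [PySem.List.pyRange_one, List.range'_eq_map_range]
  have hlen : ((frames.length : Int) - 1).toNat = frames.length - 1 := by omega
  rw [hlen, List.filter_map, List.filter_map, List.map_map]
  have hpred : ∀ k : Nat,
      ((fun i : Int => !(frames.getD i.toNat 0 == frames.getD (i - 1).toNat 0 + 1)) ∘
          fun k : Nat => 1 + (k : Int)) k
        = (pvIsBrk frames ∘ fun x : Nat => 1 + x) k := by
    intro k
    simp only [Function.comp, pvIsBrk]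
    have h1 : ((1 : Int) + (k : Int)).toNat = k + 1 := by omega
    have h2 : ((1 : Int) + (k : Int) - 1).toNat = k := by omega
    have h3 : 1 + k - 1 = k := by omega
    have h4 : 1 + k = k + 1 := by omega
    rw [h1, h2, h3, h4]
  rw [show ((fun k : Nat => (k : Int)) ∘ fun x : Nat => 1 + x) = (fun k : Nat => 1 + (k : Int))
        from funext (fun k => by simp only [Function.comp]; omega)]
  exact congrArg _ (List.filter_congr (fun k _ => hpred k))

-- ===== VERDICT (by name: the statement is the Claim_ definition above) =====
theorem frames_to_interval_string_spec : Claim_equal_frames_to_interval_string := by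
  intro frames _
  show frames_to_interval_string frames = frames_to_interval_string_alt frames
  match hf : frames with
  | [] => rfl
  | x :: rest =>
    rw [A_eq_join]
    simp only [frames_to_interval_string_alt, List.isEmpty_cons, if_neg (by decide : ¬(false = true))]
    rw [PySem.List.slice_from_one, breaks_cast]
    have hb : ((x :: rest).length : Int) = (((x :: rest).length : Nat) : Int) := rfl
    have hshape :
        ([ (0 : Int) ] ++ ((List.range' 1 ((x :: rest).length - 1)).filter (pvIsBrk (x :: rest))).map
            (fun k : Nat => (k : Int)) ++ [((x :: rest).length : Int)])
          = ((0 : Nat) :: ((List.range' 1 ((x :: rest).length - 1)).filter (pvIsBrk (x :: rest))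
              ++ [(x :: rest).length])).map (fun k : Nat => (k : Int)) := by
      simp
    rw [hshape]
    have htail : (((0 : Nat) :: ((List.range' 1 ((x :: rest).length - 1)).filter (pvIsBrk (x :: rest))
        ++ [(x :: rest).length])).map (fun k : Nat => (k : Int))).tail
        = (((List.range' 1 ((x :: rest).length - 1)).filter (pvIsBrk (x :: rest))
            ++ [(x :: rest).length])).map (fun k : Nat => (k : Int)) := rfl
    rw [htail, List.map_cons, zip_tail_pairs]
    rw [pvPairs_map_tok (x :: rest) _ 0 ?_]
    · have h0 : (0 : Nat) < (x :: rest).length := by simp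
      have := pvGo_toks (x :: rest) 0 h0
      simp only [Nat.zero_add] at this ⊢
      rw [this]
    · intro y hy
      rcases List.mem_append.mp hy with h | h
      · have := List.mem_range'_1.mp (List.mem_of_mem_filter h)
        omega
      · simp at h; omega
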